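-- pv_equiv track=rewrite | github.com/DavidBartram/advent-of-code | 2024/day02-2.py | problem_dampener
-- ===== SOURCE A (Python) =====
-- from copy import deepcopy
--
-- def is_row_safe(row):
--
--     diffs = [(b - a) for a, b in zip(row, row[1:])]
--
--     asc_desc_check = all(diff < 0 for diff in diffs) or all(diff > 0 for diff in diffs)
--
--     step_check = all(1 <= abs(diff) <= 3 for diff in diffs)
--
--     return asc_desc_check and step_check
--
-- def problem_dampener(row):
--
--     if is_row_safe(row):
--         return True
--
--     for i, _ in enumerate(row):
--         row_without_value = deepcopy(row)
--         row_without_value.pop(i)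
--         if is_row_safe(row_without_value):
--             return True
--
--     return False
-- ===== SOURCE B (Python) =====
-- def problem_dampener(row):
--     # O(n): a one-removal repair can only delete an endpoint of the FIRST bad
--     # adjacent pair in each direction, so only two candidates are tested.
--     def first_bad(sign, r):
--         j = 0
--         for a, b in zip(r, r[1:]):
--             if not (1 <= sign * (b - a) <= 3):
--                 return j
--             j += 1
--         return None
--
--     def chain_ok(sign, r):
--         return first_bad(sign, r) is None
--
--     def damp(sign):
--         j = first_bad(sign, row)
--         if j is None:
--             return True
--         return chain_ok(sign, row[:j] + row[j + 1:]) or \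
--                chain_ok(sign, row[:j + 1] + row[j + 2:])
--
--     return damp(1) or damp(-1)
-- ===== Notes on version B (the rewrite author's own statement) =====
-- stated objective: faster
-- what changed: Instead of re-testing the whole row after deleting every index, B finds the first bad adjacent pair in each direction (ascending/descending) and only tests deleting its two endpoints, since a deletion elsewhere leaves that bad pair adjacent.
import Mathlib
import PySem

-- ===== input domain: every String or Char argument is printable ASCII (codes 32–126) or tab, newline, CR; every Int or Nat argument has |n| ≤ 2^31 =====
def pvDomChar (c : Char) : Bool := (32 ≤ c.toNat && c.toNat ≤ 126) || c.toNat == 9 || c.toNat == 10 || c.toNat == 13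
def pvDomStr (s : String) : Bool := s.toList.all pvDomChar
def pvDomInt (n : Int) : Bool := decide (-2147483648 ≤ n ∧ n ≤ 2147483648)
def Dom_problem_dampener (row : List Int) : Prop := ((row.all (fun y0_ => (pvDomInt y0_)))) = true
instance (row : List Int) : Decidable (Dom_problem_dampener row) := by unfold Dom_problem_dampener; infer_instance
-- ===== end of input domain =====

-- B replaces A's quadratic try-every-deletion scan with an O(n) check that only tests
-- deleting the two endpoints of the first bad adjacent pair in each direction.

-- ===== PORT A =====
-- is_row_safe: diff list, monotone check, step check (abs diff in [1,3])
def is_row_safe (row : List Int) : Bool :=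
  let diffs := (row.zip (row.drop 1)).map (fun ab => ab.2 - ab.1)
  let asc_desc_check := diffs.all (fun d => decide (d < 0)) || diffs.all (fun d => decide (0 < d))
  let step_check := diffs.all (fun d => decide (1 ≤ d.natAbs ∧ d.natAbs ≤ 3))
  asc_desc_check && step_check

-- the for-loop with early return over i in range(len(row)); deepcopy+pop(i) with
-- 0 ≤ i < len(row) is exactly List.eraseIdx i
def problem_dampener (row : List Int) : Bool :=
  if is_row_safe row then true
  else (List.range row.length).any (fun i => is_row_safe (row.eraseIdx i))

-- ===== PORT B =====
def pvOkPair (sign a b : Int) : Bool := decide (1 ≤ sign * (b - a) ∧ sign * (b - a) ≤ 3)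

-- B's first_bad loop: walks the adjacent pairs keeping the counter j
def pvFirstBadGo (sign : Int) (j : Nat) : List (Int × Int) → Option Nat
  | [] => none
  | (a, b) :: ps => if pvOkPair sign a b then pvFirstBadGo sign (j + 1) ps else some j

def pvFirstBad (sign : Int) (r : List Int) : Option Nat :=
  pvFirstBadGo sign 0 (r.zip (r.drop 1))

def pvChainOk (sign : Int) (r : List Int) : Bool := (pvFirstBad sign r).isNone

-- row[:j] + row[j+1:]  =  take j ++ drop (j+1)   (j is a nonnegative in-range index)
def pvDamp (row : List Int) (sign : Int) : Bool :=
  match pvFirstBad sign row with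
  | none => true
  | some j => pvChainOk sign (row.take j ++ row.drop (j + 1)) ||
              pvChainOk sign (row.take (j + 1) ++ row.drop (j + 2))

def problem_dampener_alt (row : List Int) : Bool :=
  pvDamp row 1 || pvDamp row (-1)

-- ===== PRECONDITION & SPEC =====
def Spec_problem_dampener (row : List Int) (out : Bool) : Prop := out = problem_dampener_alt row
instance (row : List Int) (out : Bool) : Decidable (Spec_problem_dampener row out) := by unfold Spec_problem_dampener; infer_instance

-- ===== CLAIM (what is proved, stated in full; the proofs are below) =====
def Claim_equal_problem_dampener : Prop := ∀ (row : List Int), Dom_problem_dampener row → Spec_problem_dampener row (problem_dampener row)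

-- ===== LEMMAS AND PROOFS =====

-- all adjacent pairs of r are ok for direction `sign`
def pvPairsAll (sign : Int) (r : List Int) : Bool :=
  (r.zip (r.drop 1)).all (fun p => pvOkPair sign p.1 p.2)

theorem pv_all_and {a : Type} (f g : a -> Bool) (l : List a) :
    l.all (fun d => f d && g d) = (l.all f && l.all g) := by
  induction l with
  | nil => rfl
  | cons d t ih =>
      simp only [List.all_cons, ih]
      cases f d <;> cases g d <;> cases t.all f <;> cases t.all g <;> rfl

theorem pv_distrib {a : Type} (neg pos step : a -> Bool) (l : List a) :
    ((l.all neg || l.all pos) && l.all step)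
      = (l.all (fun d => neg d && step d) || l.all (fun d => pos d && step d)) := by
  rw [pv_all_and, pv_all_and]
  cases l.all neg <;> cases l.all pos <;> cases l.all step <;> rfl

theorem okdn_pointwise (p : Int × Int) :
    (((fun d : Int => decide (d < 0)) ∘ fun ab : Int × Int => ab.2 - ab.1) p &&
     ((fun d : Int => decide (1 ≤ d.natAbs ∧ d.natAbs ≤ 3)) ∘ fun ab : Int × Int => ab.2 - ab.1) p)
      = pvOkPair (-1) p.1 p.2 := by
  obtain ⟨x, y⟩ := p
  simp only [Function.comp, pvOkPair]
  rw [← Bool.decide_and, decide_eq_decide]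
  omega

theorem okup_pointwise (p : Int × Int) :
    (((fun d : Int => decide (0 < d)) ∘ fun ab : Int × Int => ab.2 - ab.1) p &&
     ((fun d : Int => decide (1 ≤ d.natAbs ∧ d.natAbs ≤ 3)) ∘ fun ab : Int × Int => ab.2 - ab.1) p)
      = pvOkPair 1 p.1 p.2 := by
  obtain ⟨x, y⟩ := p
  simp only [Function.comp, pvOkPair]
  rw [← Bool.decide_and, decide_eq_decide]
  omega

-- A's safety test = B's two directed chain tests
theorem is_row_safe_eq (r : List Int) :
    is_row_safe r = (pvPairsAll 1 r || pvPairsAll (-1) r) := by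
  unfold is_row_safe pvPairsAll
  simp only [List.all_map]
  rw [pv_distrib]
  rw [List.all_congr rfl okdn_pointwise, List.all_congr rfl okup_pointwise]
  exact Bool.or_comm _ _

-- pvFirstBadGo: none iff all pairs are ok
theorem go_none_iff (s : Int) (c : Nat) (ps : List (Int × Int)) :
    pvFirstBadGo s c ps = none ↔ ps.all (fun p => pvOkPair s p.1 p.2) = true := by
  induction ps generalizing c with
  | nil => simp [pvFirstBadGo]
  | cons p t ih =>
      obtain ⟨x, y⟩ := p
      simp only [pvFirstBadGo, List.all_cons]
      by_cases h : pvOkPair s x y = true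
      · simp [h, ih]
      · simp [Bool.not_eq_true] at h
        simp [h]

theorem go_some (s : Int) (ps : List (Int × Int)) (c j : Nat)
    (h : pvFirstBadGo s c ps = some j) :
    ∃ k, j = c + k ∧ ∃ hk : k < ps.length,
      pvOkPair s ps[k].1 ps[k].2 = false ∧
      ∀ i (hi : i < k), pvOkPair s ps[i].1 ps[i].2 = true := by
  induction ps generalizing c with
  | nil => simp [pvFirstBadGo] at h
  | cons p t ih =>
      obtain ⟨x, y⟩ := p
      simp only [pvFirstBadGo] at h
      by_cases hok : pvOkPair s x y = true
      · rw [if_pos hok] at h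
        obtain ⟨k, hk1, hk2, hbad, hall⟩ := ih (c + 1) h
        refine ⟨k + 1, by omega, by simpa using Nat.succ_lt_succ hk2, by simpa using hbad, ?_⟩
        intro i hi
        cases i with
        | zero => simpa using hok
        | succ i' => simpa using hall i' (by omega)
      · rw [if_neg hok] at h
        injection h with h'
        subst h'
        refine ⟨0, by omega, by simp, ?_, fun i hi => absurd hi (Nat.not_lt_zero i)⟩
        simp [Bool.not_eq_true] at hok
        simpa using hok

theorem pairs_length (r : List Int) : (r.zip (r.drop 1)).length = r.length - 1 := by
  simp

theorem pairs_fst (r : List Int) (i : Nat) (h : i < (r.zip (r.drop 1)).length) :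
    ((r.zip (r.drop 1))[i]).1 = r[i]'(by rw [pairs_length] at h; omega) := by
  rw [List.getElem_zip]

theorem pairs_snd (r : List Int) (i : Nat) (h : i < (r.zip (r.drop 1)).length) :
    ((r.zip (r.drop 1))[i]).2 = r[i + 1]'(by rw [pairs_length] at h; omega) := by
  rw [List.getElem_zip]
  simp

-- pvPairsAll via indices
theorem pairsAll_iff (s : Int) (r : List Int) :
    pvPairsAll s r = true ↔ ∀ i (h : i + 1 < r.length), pvOkPair s (r[i]'(by omega)) (r[i + 1]'h) = true := by
  unfold pvPairsAll
  rw [List.all_eq_true]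
  constructor
  · intro hall i h
    have hi : i < (r.zip (r.drop 1)).length := by rw [pairs_length]; omega
    have hx := hall _ (List.getElem_mem hi)
    rw [pairs_fst r i hi, pairs_snd r i hi] at hx
    exact hx
  · intro hidx p hp
    obtain ⟨i, hi, rfl⟩ := List.mem_iff_getElem.mp hp
    have h1 : i + 1 < r.length := by rw [pairs_length] at hi; omega
    have := hidx i h1
    rw [pairs_fst r i hi, pairs_snd r i hi]
    exact this

theorem chainOk_eq (s : Int) (r : List Int) : pvChainOk s r = pvPairsAll s r := by
  unfold pvChainOk pvFirstBad
  cases hgo : pvFirstBadGo s 0 (r.zip (r.drop 1)) with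
  | none =>
      have h := (go_none_iff s 0 _).mp hgo
      unfold pvPairsAll
      rw [h]
      rfl
  | some j =>
      obtain ⟨k, _, hk, hbad, _⟩ := go_some s _ 0 j hgo
      have hne : pvPairsAll s r = false := by
        rw [Bool.eq_false_iff]
        unfold pvPairsAll
        intro hall
        rw [List.all_eq_true] at hall
        have hb := hall _ (List.getElem_mem hk)
        simp only at hb
        rw [hb] at hbad
        exact Bool.noConfusion hbad
      rw [hne]
      rfl

-- key: a deletion away from the first bad pair cannot repair the chain
theorem erase_far_bad (s : Int) (r : List Int) (j k : Nat)
    (hj : j + 1 < r.length) (hbad : pvOkPair s (r[j]'(by omega)) (r[j + 1]'hj) = false)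
    (hk : k < r.length) (h1 : k ≠ j) (h2 : k ≠ j + 1) :
    pvPairsAll s (r.eraseIdx k) = false := by
  rw [Bool.eq_false_iff]
  rw [Ne, pairsAll_iff]
  intro hall
  have hlen : (r.eraseIdx k).length = r.length - 1 := by
    rw [List.length_eraseIdx]
    simp [hk]
  rcases Nat.lt_or_ge k j with hlt | hge
  · -- k < j: old pair (j, j+1) sits at positions (j-1, j) after the deletion
    have hj1 : (j - 1) + 1 < (r.eraseIdx k).length := by omega
    have hx := hall (j - 1) hj1
    have e1 : (r.eraseIdx k)[j - 1]'(by omega) = r[j]'(by omega) := by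
      rw [List.getElem_eraseIdx_of_ge (by omega) (by omega)]
      have hix : j - 1 + 1 = j := by omega
      simp [hix]
    have e2 : (r.eraseIdx k)[(j - 1) + 1]'hj1 = r[j + 1]'hj := by
      rw [List.getElem_eraseIdx_of_ge (by omega) (by omega)]
      have hix : j - 1 + 1 + 1 = j + 1 := by omega
      simp [hix]
    rw [e1, e2] at hx
    rw [hx] at hbad
    exact Bool.noConfusion hbad
  · -- k > j + 1: the pair (j, j+1) is untouched
    have hj1 : j + 1 < (r.eraseIdx k).length := by omega
    have hx := hall j hj1
    have e1 : (r.eraseIdx k)[j]'(by omega) = r[j]'(by omega) :=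
      List.getElem_eraseIdx_of_lt (by omega) (by omega)
    have e2 : (r.eraseIdx k)[j + 1]'hj1 = r[j + 1]'hj :=
      List.getElem_eraseIdx_of_lt (by omega) (by omega)
    rw [e1, e2] at hx
    rw [hx] at hbad
    exact Bool.noConfusion hbad

theorem take_drop_eq_erase (r : List Int) (k : Nat) :
    r.take k ++ r.drop (k + 1) = r.eraseIdx k := by
  rw [List.eraseIdx_eq_take_drop_succ]

-- per-direction: B's damp equals A's exhaustive deletion test
theorem damp_iff (s : Int) (row : List Int) :
    pvDamp row s = true ↔
      (pvPairsAll s row = true ∨ ∃ k, k < row.length ∧ pvPairsAll s (row.eraseIdx k) = true) := by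
  unfold pvDamp
  cases hfb : pvFirstBad s row with
  | none =>
      constructor
      · intro _
        left
        unfold pvFirstBad at hfb
        exact (go_none_iff s 0 _).mp hfb
      · intro _
        rfl
  | some j =>
      unfold pvFirstBad at hfb
      obtain ⟨k0, hk0, hkl, hbad, _⟩ := go_some s _ 0 j hfb
      have hj : j = k0 := by omega
      rw [hj]
      have hjlen : k0 + 1 < row.length := by
        rw [pairs_length] at hkl
        omega
      rw [pairs_fst row k0 hkl, pairs_snd row k0 hkl] at hbad
      simp only [take_drop_eq_erase, chainOk_eq, Bool.or_eq_true]
      constructor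
      · rintro (h | h)
        · exact Or.inr ⟨k0, by omega, h⟩
        · exact Or.inr ⟨k0 + 1, by omega, h⟩
      · rintro (h | h)
        · exfalso
          rw [pairsAll_iff] at h
          have hx := h k0 hjlen
          rw [hx] at hbad
          exact Bool.noConfusion hbad
        · obtain ⟨k, hk, hok⟩ := h
          by_cases e1 : k = k0
          · subst e1
            exact Or.inl hok
          by_cases e2 : k = k0 + 1
          · subst e2
            exact Or.inr hok
          · exfalso
            have hf := erase_far_bad s row k0 k hjlen hbad hk e1 e2
            rw [hok] at hf
            exact Bool.noConfusion hf

theorem A_iff (row : List Int) :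
    problem_dampener row = true ↔
      ((pvPairsAll 1 row = true ∨ pvPairsAll (-1) row = true) ∨
       ∃ k, k < row.length ∧
         (pvPairsAll 1 (row.eraseIdx k) = true ∨ pvPairsAll (-1) (row.eraseIdx k) = true)) := by
  unfold problem_dampener
  by_cases h : is_row_safe row = true
  · rw [if_pos h]
    rw [is_row_safe_eq] at h
    simp only [Bool.or_eq_true] at h
    simp [h]
  · rw [if_neg h]
    have h' := h
    rw [is_row_safe_eq] at h'
    simp only [Bool.or_eq_true] at h'
    rw [List.any_eq_true]
    constructor
    · rintro ⟨i, hi, hsafe⟩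
      rw [List.mem_range] at hi
      rw [is_row_safe_eq, Bool.or_eq_true] at hsafe
      exact Or.inr ⟨i, hi, hsafe⟩
    · rintro (hc | ⟨k, hk, hok⟩)
      · exact absurd hc h'
      · exact ⟨k, List.mem_range.mpr hk, by rw [is_row_safe_eq, Bool.or_eq_true]; exact hok⟩

-- ===== VERDICT (by name: the statement is the Claim_ definition above) =====
theorem problem_dampener_spec : Claim_equal_problem_dampener := by
  intro row _
  unfold Spec_problem_dampener problem_dampener_alt
  rw [Bool.eq_iff_iff, A_iff, Bool.or_eq_true, damp_iff, damp_iff]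
  constructor
  · rintro ((h | h) | ⟨k, hk, (h | h)⟩)
    · exact Or.inl (Or.inl h)
    · exact Or.inr (Or.inl h)
    · exact Or.inl (Or.inr ⟨k, hk, h⟩)
    · exact Or.inr (Or.inr ⟨k, hk, h⟩)
  · rintro ((h | ⟨k, hk, h⟩) | (h | ⟨k, hk, h⟩))
    · exact Or.inl (Or.inl h)
    · exact Or.inr ⟨k, hk, Or.inl h⟩
    · exact Or.inl (Or.inr h)
    · exact Or.inr ⟨k, hk, Or.inr h⟩
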